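-- pv_equiv track=rewrite | github.com/DanteNorlingTE21/Prog-1 | Funcs.py | snake_list_shuffle
-- ===== SOURCE A (Python) =====
-- def snake_list_shuffle(x):
--     funklist = []
--     funklist.append(x[0])
--     if len(x) >= 2:
--         funklist.append(x[len(x)-1])
--     if len(x) > 2:
--         for i in range(2,len(x)):
--             funklist.append(x[i-1])
--     return funklist
-- ===== SOURCE B (Python) =====
-- def snake_list_shuffle(x):
--     # Same result viewed differently: the output is x with its last element
--     # moved to position 1.  Copy, pop the tail, splice it back in at index 1.
--     y = list(x)
--     y.insert(1, y.pop())
--     return y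
-- ===== Notes on version B (the rewrite author's own statement) =====
-- stated objective: simpler
-- what changed: Instead of assembling first/last/middle with an index-arithmetic append loop, B observes the output is the input with its last element moved to position 1 and performs that single pop/insert splice on a copy.
import Mathlib
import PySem

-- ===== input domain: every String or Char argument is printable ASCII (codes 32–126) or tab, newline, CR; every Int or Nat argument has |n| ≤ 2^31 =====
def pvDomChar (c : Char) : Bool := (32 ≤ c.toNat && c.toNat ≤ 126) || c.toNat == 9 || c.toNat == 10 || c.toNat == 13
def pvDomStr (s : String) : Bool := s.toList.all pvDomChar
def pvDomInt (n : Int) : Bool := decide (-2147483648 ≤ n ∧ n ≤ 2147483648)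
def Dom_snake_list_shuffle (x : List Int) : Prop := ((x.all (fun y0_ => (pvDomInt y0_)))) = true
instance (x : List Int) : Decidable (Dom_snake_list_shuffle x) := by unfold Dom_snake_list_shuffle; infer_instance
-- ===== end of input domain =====

-- B replaces A's first/last/middle index loop with one splice: copy the list and move its last element to position 1 (simpler).

-- ===== PORT A =====
def snake_list_shuffle (x : List Int) : List Int :=
  let funklist : List Int := []
  let funklist := funklist ++ [PySem.List.pyGetD x 0 0]
  let funklist := if 2 ≤ (x.length : Int) then funklist ++ [PySem.List.pyGetD x ((x.length : Int) - 1) 0] else funklist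
  if 2 < (x.length : Int) then
    (PySem.List.pyRange 2 (x.length : Int) 1).foldl (fun acc i => acc ++ [PySem.List.pyGetD x (i - 1) 0]) funklist
  else funklist

-- ===== PORT B =====
-- y.pop() on the empty list raises IndexError (excluded by Pre_); the none branch returns [].
def snake_list_shuffle_alt (x : List Int) : List Int :=
  match PySem.List.pop? x (-1) with
  | none => []
  | some (v, y) => PySem.List.insert y 1 v

-- ===== PRECONDITION & SPEC =====
-- Both Pythons raise IndexError on the empty list (A at x[0], B at y.pop()); Pre_ excludes exactly that input.
def Pre_snake_list_shuffle (x : List Int) : Prop := x ≠ []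
instance (x : List Int) : Decidable (Pre_snake_list_shuffle x) := by unfold Pre_snake_list_shuffle; infer_instance
def pvWitness_snake_list_shuffle : List Int := [3, 1, 4]

def Spec_snake_list_shuffle (x : List Int) (out : List Int) : Prop := out = snake_list_shuffle_alt x
instance (x : List Int) (out : List Int) : Decidable (Spec_snake_list_shuffle x out) := by unfold Spec_snake_list_shuffle; infer_instance

-- ===== CLAIM (what is proved, stated in full; the proofs are below) =====
def Claim_equal_snake_list_shuffle : Prop := ∀ (x : List Int), Dom_snake_list_shuffle x → Pre_snake_list_shuffle x → Spec_snake_list_shuffle x (snake_list_shuffle x)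

-- ===== LEMMAS AND PROOFS =====

-- A's loop, flattened: the appended values are the interior elements of x.
lemma loop_eq_interior (x : List Int) :
    (PySem.List.pyRange 2 (x.length : Int) 1).map (fun i => PySem.List.pyGetD x (i - 1) 0)
      = (x.drop 1).take (x.length - 2) := by
  rw [PySem.List.pyRange_one, List.map_map]
  apply List.ext_getElem
  · simp
    omega
  · intro k h1 h2
    simp only [List.getElem_map, List.getElem_range, Function.comp_apply,
      List.getElem_take, List.getElem_drop]
    have hk : k < x.length - 2 := by
      simp only [List.length_take, List.length_drop, lt_min_iff] at h2
      omega
    have hcast : ((2 : Int) + k - 1) = ((1 + k : Nat) : Int) := by push_cast; ring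
    rw [hcast, PySem.List.pyGetD_natCast]
    have hlt : 1 + k < x.length := by omega
    rw [List.getD_eq_getElem _ _ hlt]

-- B in closed form: for nonempty x it is head, last, then the interior of x.
lemma alt_closed (x : List Int) (h : x ≠ []) :
    snake_list_shuffle_alt x =
      if 2 ≤ x.length then
        PySem.List.pyGetD x 0 0 :: x.getLast h :: (x.drop 1).take (x.length - 2)
      else [PySem.List.pyGetD x 0 0] := by
  unfold snake_list_shuffle_alt
  have hpop : PySem.List.pop? x = some (x.getLast h, x.dropLast) := by
    conv_lhs => rw [← List.dropLast_append_getLast h]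
    rw [PySem.List.pop?_last]
  rw [hpop]
  show PySem.List.insert x.dropLast 1 (x.getLast h) = _
  by_cases h2 : 2 ≤ x.length
  · rw [if_pos h2]
    have h1 : 1 ≤ x.dropLast.length := by simp [List.length_dropLast]; omega
    rw [PySem.List.insert_ofNat _ _ _ h1]
    have hhead : x.dropLast.take 1 = [PySem.List.pyGetD x 0 0] := by
      rw [PySem.List.pyGetD_zero]
      cases x with
      | nil => exact absurd rfl h
      | cons a xs =>
        cases xs with
        | nil => simp at h2
        | cons b ys => simp [List.dropLast]
    rw [hhead]
    have hdrop : x.dropLast.drop 1 = (x.drop 1).take (x.length - 2) := by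
      rw [List.dropLast_eq_take, List.drop_take]
      congr 1
    rw [hdrop]
    simp
  · -- singleton
    rw [if_neg h2]
    have hlen : x.length = 1 := by
      have := List.length_pos_iff.mpr h; omega
    obtain ⟨a, ha⟩ : ∃ a, x = [a] := by
      cases x with
      | nil => exact absurd rfl h
      | cons a xs => cases xs with
        | nil => exact ⟨a, rfl⟩
        | cons b ys => simp at hlen
    subst ha
    simp [PySem.List.insert, PySem.List.pyGetD]

-- The index len-1 reads the last element.
lemma lenm1_eq_last (x : List Int) (h : x ≠ []) :
    PySem.List.pyGetD x ((x.length : Int) - 1) 0 = x.getLast h := by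
  have h0 : 0 < x.length := List.length_pos_iff.mpr h
  have hcast : ((x.length : Int) - 1) = ((x.length - 1 : Nat) : Int) := by push_cast [h0]; omega
  rw [hcast, PySem.List.pyGetD_natCast,
    List.getD_eq_getElem _ _ (by omega), List.getLast_eq_getElem]

lemma main_eq (x : List Int) (h : x ≠ []) :
    snake_list_shuffle x = snake_list_shuffle_alt x := by
  rw [alt_closed x h]
  unfold snake_list_shuffle
  simp only
  by_cases h3 : (2 : Int) < (x.length : Int)
  · have h2 : (2 : Int) ≤ (x.length : Int) := le_of_lt h3
    rw [if_pos h2, if_pos h3, if_pos (by exact_mod_cast h2 : 2 ≤ x.length),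
      PySem.List.foldl_append_singleton_eq_map, loop_eq_interior, lenm1_eq_last x h]
    simp
  · by_cases h2 : (2 : Int) ≤ (x.length : Int)
    · -- length exactly 2
      have hlen2 : x.length = 2 := by omega
      rw [if_pos h2, if_neg h3, if_pos (by omega : 2 ≤ x.length), lenm1_eq_last x h]
      simp [hlen2]
    · rw [if_neg h2, if_neg (by omega : ¬ (2 : Int) < (x.length : Int)),
        if_neg (by exact_mod_cast h2 : ¬ 2 ≤ x.length)]
      simp

-- ===== VERDICT (by name: the statement is the Claim_ definition above) =====
theorem snake_list_shuffle_spec : Claim_equal_snake_list_shuffle := by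
  intro x _ hpre
  exact main_eq x hpre
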